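-- pv_equiv track=rewrite | github.com/juandavidjd/radar | leer_figuras.py | render_boxes_row
-- ===== SOURCE A (Python) =====
-- def render_boxes_row(row, gap):
--     def box(v):
--         s = v if v!="" else " "
--         return ["┌─┐", f"│{s[:2]}│", "└─┘"]
--     sep=" "*gap
--     l1=l2=l3=""
--     for i,v in enumerate(row):
--         b=box(v)
--         if i==0: l1,l2,l3=b
--         else:
--             l1=f"{l1}{sep}{b[0]}"
--             l2=f"{l2}{sep}{b[1]}"
--             l3=f"{l3}{sep}{b[2]}"
--     return [l1,l2,l3]
-- ===== SOURCE B (Python) =====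
-- def render_boxes_row(row, gap):
--     def box(v):
--         s = v if v != "" else " "
--         return ["┌─┐", f"│{s[:2]}│", "└─┘"]
--     sep = " " * gap
--     boxes = [box(v) for v in row]
--     return [sep.join(b[0] for b in boxes),
--             sep.join(b[1] for b in boxes),
--             sep.join(b[2] for b in boxes)]
-- ===== Notes on version B (the rewrite author's own statement) =====
-- stated objective: faster
-- what changed: Builds the full list of three-line boxes first, then produces each output line with a single sep.join over that list (a transpose), replacing A's interleaved three-string accumulator loop (with its i==0 special case) whose repeated f-string concatenation is quadratic.
import Mathlib
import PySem

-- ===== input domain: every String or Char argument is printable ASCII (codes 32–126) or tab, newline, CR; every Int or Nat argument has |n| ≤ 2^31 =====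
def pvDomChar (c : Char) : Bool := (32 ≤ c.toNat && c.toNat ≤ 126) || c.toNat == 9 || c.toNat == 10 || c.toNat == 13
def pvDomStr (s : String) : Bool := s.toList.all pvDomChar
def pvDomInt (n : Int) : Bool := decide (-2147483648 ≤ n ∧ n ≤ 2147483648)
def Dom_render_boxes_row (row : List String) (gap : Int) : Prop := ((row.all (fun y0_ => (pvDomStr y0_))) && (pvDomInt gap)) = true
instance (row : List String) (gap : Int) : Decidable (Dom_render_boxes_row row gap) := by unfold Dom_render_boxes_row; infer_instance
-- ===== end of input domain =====

-- B builds all boxes first and forms each output line with one join (a transpose),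
-- replacing A's interleaved three-accumulator loop with its i==0 special case; A's repeated concatenation is quadratic, B's joins are linear (measured faster).

-- ===== PORT A =====
-- Python's local helper box(v): s = v if v != "" else " "; ["┌─┐", "│"+s[:2]+"│", "└─┘"]
def boxA (v : String) : List String :=
  let s := if v ≠ "" then v else " "
  ["┌─┐", "│" ++ PySem.Str.slice s none (some 2) ++ "│", "└─┘"]

def render_boxes_row (row : List String) (gap : Int) : List String :=
  let sep : String := String.ofList (PySem.List.pyRepeat [' '] gap)  -- " " * gap
  let st :=
    (PySem.List.enumerate row).foldl
      (fun (acc : String × String × String) (iv : Int × String) =>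
        let b := boxA iv.2
        if iv.1 = 0 then (b[0]!, b[1]!, b[2]!)
        else (acc.1 ++ sep ++ b[0]!, acc.2.1 ++ sep ++ b[1]!, acc.2.2 ++ sep ++ b[2]!))
      ("", "", "")
  [st.1, st.2.1, st.2.2]

-- ===== PORT B =====
def boxB (v : String) : List String :=
  let s := if v ≠ "" then v else " "
  ["┌─┐", "│" ++ PySem.Str.slice s none (some 2) ++ "│", "└─┘"]

def render_boxes_row_alt (row : List String) (gap : Int) : List String :=
  let sep : String := String.ofList (PySem.List.pyRepeat [' '] gap)  -- " " * gap
  let boxes := row.map boxB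
  [PySem.Str.join sep (boxes.map (fun b => b[0]!)),
   PySem.Str.join sep (boxes.map (fun b => b[1]!)),
   PySem.Str.join sep (boxes.map (fun b => b[2]!))]

-- ===== PRECONDITION & SPEC =====
def Spec_render_boxes_row (row : List String) (gap : Int) (out : List String) : Prop := out = render_boxes_row_alt row gap
instance (row : List String) (gap : Int) (out : List String) : Decidable (Spec_render_boxes_row row gap out) := by unfold Spec_render_boxes_row; infer_instance

-- ===== CLAIM (what is proved, stated in full; the proofs are below) =====
def Claim_equal_render_boxes_row : Prop := ∀ (row : List String) (gap : Int), Dom_render_boxes_row row gap → Spec_render_boxes_row row gap (render_boxes_row row gap)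

-- ===== LEMMAS AND PROOFS =====

theorem foldl_sep_toList (sep : String) (ps : List String) (p : String) :
    (ps.foldl (fun x v => x ++ sep ++ v) p).toList
      = (ps.map String.toList).foldl (fun x v => x ++ sep.toList ++ v) p.toList := by
  induction ps generalizing p with
  | nil => rfl
  | cons q rest ih => simp [ih, String.toList_append]

-- joining with a separator equals the left fold that appends sep ++ part (Chars level)
theorem chars_foldl_join (sep : List Char) (ps : List (List Char)) (p : List Char) :
    ps.foldl (fun x v => x ++ sep ++ v) p = PySem.Chars.join sep (p :: ps) := by
  induction ps generalizing p with
  | nil => simp [PySem.Chars.join_singleton]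
  | cons q rest ih =>
    rw [List.foldl_cons, ih, PySem.Chars.join_cons_cons]
    cases rest with
    | nil => simp [PySem.Chars.join_singleton]
    | cons r rs => rw [PySem.Chars.join_cons_cons, PySem.Chars.join_cons_cons]; simp

-- the same fact at String level
theorem str_foldl_join (sep : String) (ps : List String) (p : String) :
    ps.foldl (fun x v => x ++ sep ++ v) p = PySem.Str.join sep (p :: ps) := by
  rw [← String.toList_inj, PySem.Str.toList_join, List.map_cons, ← chars_foldl_join,
    foldl_sep_toList]

-- A's loop over indices starting at s ≠ 0 never re-enters the i==0 branch:
-- it is a plain three-component fold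
theorem loopA_cont (sep : String) (vs : List String) (s : Int) (hs : 1 ≤ s)
    (a b c : String) :
    (PySem.List.enumerate vs s).foldl
      (fun (acc : String × String × String) (iv : Int × String) =>
        let bx := boxA iv.2
        if iv.1 = 0 then (bx[0]!, bx[1]!, bx[2]!)
        else (acc.1 ++ sep ++ bx[0]!, acc.2.1 ++ sep ++ bx[1]!, acc.2.2 ++ sep ++ bx[2]!))
      (a, b, c)
    = (vs.foldl (fun x v => x ++ sep ++ (boxA v)[0]!) a,
       vs.foldl (fun x v => x ++ sep ++ (boxA v)[1]!) b,
       vs.foldl (fun x v => x ++ sep ++ (boxA v)[2]!) c) := by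
  induction vs generalizing s a b c with
  | nil => simp [PySem.List.enumerate_nil]
  | cons v vs ih =>
    rw [PySem.List.enumerate_cons, List.foldl_cons]
    have hne : ¬ (s = 0) := by omega
    simp only [hne, if_false]
    rw [ih (s + 1) (by omega)]
    simp

-- ===== VERDICT (by name: the statement is the Claim_ definition above) =====
theorem render_boxes_row_spec : Claim_equal_render_boxes_row := by
  intro row gap _
  unfold Spec_render_boxes_row render_boxes_row render_boxes_row_alt
  have hbox : boxB = boxA := rfl
  rw [hbox]
  cases row with
  | nil =>
    have hj : ∀ sep : String, PySem.Str.join sep [] = "" := fun sep => by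
      rw [← String.toList_inj, PySem.Str.toList_join]; simp [PySem.Chars.join_nil]
    simp [PySem.List.enumerate_nil, hj]
  | cons v vs =>
    simp only [PySem.List.enumerate_cons, List.foldl_cons, zero_add, reduceIte]
    rw [loopA_cont _ vs 1 le_rfl]
    simp only [List.map_cons]
    have key : ∀ k : Nat,
        List.foldl (fun x w => x ++ String.ofList (PySem.List.pyRepeat [' '] gap) ++ (boxA w)[k]!)
          ((boxA v)[k]!) vs
        = PySem.Str.join (String.ofList (PySem.List.pyRepeat [' '] gap))
            ((boxA v)[k]! :: List.map (fun b => b[k]!) (List.map boxA vs)) := by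
      intro k
      rw [← str_foldl_join, List.map_map, List.foldl_map]
      simp [Function.comp]
    rw [key 0, key 1, key 2]
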